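-- pv_equiv track=rewrite | github.com/JulianKarrer/brainfuck-txt | translate.py | copyToNextSkipEff
-- ===== SOURCE A (Python) =====
-- def copyToNextSkipEff(numberOfCells:int, skipmask:list[bool])->str:
--     """Like CopyToNextSkip but returns the pointer with a loop in
--     3 chars instead of len(text) chars
--     """
--     assert len(skipmask) == numberOfCells
--
--     #trailing consecutive skips need not be encoded
--     trailing = 0
--     for skip in skipmask[::-1]:
--         if skip:
--             trailing += 1
--         else:
--             break
--     skipmask = skipmask[:-trailing] if trailing else skipmask
--
--     res = "["
--     for skip in skipmask:
--         res += ">" if skip else ">+"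
--     res += "[<]>"
--     res += "-]"
--     return res
-- ===== SOURCE B (Python) =====
-- def copyToNextSkipEff(numberOfCells: int, skipmask: list[bool]) -> str:
--     """Like CopyToNextSkip but returns the pointer with a loop in
--     3 chars instead of len(text) chars
--     """
--     assert len(skipmask) == numberOfCells
--     # build the body from the POSITIONS of the non-skip cells: before each '+'
--     # there are exactly (i - prev) '>'s; skips after the last '+' produce nothing,
--     # so trailing skips are trimmed implicitly.
--     falses = [i for i, s in enumerate(skipmask) if not s]
--     parts = []
--     prev = -1
--     for i in falses:
--         parts.append(">" * (i - prev) + "+")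
--         prev = i
--     return "[" + "".join(parts) + "[<]>-]"
-- ===== Notes on version B (the rewrite author's own statement) =====
-- stated objective: alternative
-- what changed: B builds the body from the positions of the non-skip cells (a run of '>'s sized by the gap to the previous '+' for each), so trailing skips are trimmed implicitly; A instead counts trailing skips in a reverse loop, slices the mask, and appends a per-cell code for every cell.
import Mathlib
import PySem

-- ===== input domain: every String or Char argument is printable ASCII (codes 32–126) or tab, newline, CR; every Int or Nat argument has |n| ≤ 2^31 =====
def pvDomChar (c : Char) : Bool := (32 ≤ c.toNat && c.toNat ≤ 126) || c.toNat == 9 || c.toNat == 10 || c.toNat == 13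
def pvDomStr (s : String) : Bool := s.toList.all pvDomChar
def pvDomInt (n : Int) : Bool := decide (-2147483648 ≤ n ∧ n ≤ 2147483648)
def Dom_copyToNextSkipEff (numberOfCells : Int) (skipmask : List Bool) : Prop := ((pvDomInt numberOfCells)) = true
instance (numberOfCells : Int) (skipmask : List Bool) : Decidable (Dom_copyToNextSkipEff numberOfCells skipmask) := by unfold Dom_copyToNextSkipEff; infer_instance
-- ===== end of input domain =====

-- B builds the body from the positions of the non-skip cells (gap-sized runs of '>' before each '+',
-- so trailing skips are trimmed implicitly) instead of A's reverse count + slice + per-cell append (objective: alternative).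


-- ===== PORT A =====
-- 'for skip in skipmask[::-1]: if skip: trailing += 1 else: break'
-- (skipmask[::-1] is skipmask.reverse)
def aTrailing : List Bool → Nat
  | [] => 0
  | b :: t => if b then aTrailing t + 1 else 0

def copyToNextSkipEff (numberOfCells : Int) (skipmask : List Bool) : String :=
  -- assert len(skipmask) == numberOfCells → Pre_copyToNextSkipEff
  let trailing := aTrailing skipmask.reverse
  let skipmask := if trailing ≠ 0 then PySem.List.slice skipmask none (some (-(trailing : Int))) else skipmask
  let res := "["
  let res := skipmask.foldl (fun r skip => r ++ (if skip then ">" else ">+")) res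
  let res := res ++ "[<]>"
  let res := res ++ "-]"
  res

-- ===== PORT B =====
-- falses = [i for i, s in enumerate(skipmask) if not s]; then a loop appending ">"*(i-prev)+"+"
def copyToNextSkipEff_alt (numberOfCells : Int) (skipmask : List Bool) : String :=
  let falses := (PySem.List.enumerate skipmask).filterMap (fun p => if p.2 then none else some p.1)
  let st := falses.foldl (fun (acc : List String × Int) i =>
      (acc.1 ++ [String.ofList (PySem.List.pyRepeat ['>'] (i - acc.2)) ++ "+"], i)) ([], -1)
  "[" ++ PySem.Str.join "" st.1 ++ "[<]>-]"

-- ===== PRECONDITION & SPEC =====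
-- A's assert: len(skipmask) == numberOfCells, else AssertionError
def Pre_copyToNextSkipEff (numberOfCells : Int) (skipmask : List Bool) : Prop :=
  (skipmask.length : Int) = numberOfCells
instance (numberOfCells : Int) (skipmask : List Bool) : Decidable (Pre_copyToNextSkipEff numberOfCells skipmask) := by unfold Pre_copyToNextSkipEff; infer_instance
def pvWitness_copyToNextSkipEff : Int × List Bool := (3, [false, true, true])

def Spec_copyToNextSkipEff (numberOfCells : Int) (skipmask : List Bool) (out : String) : Prop := out = copyToNextSkipEff_alt numberOfCells skipmask
instance (numberOfCells : Int) (skipmask : List Bool) (out : String) : Decidable (Spec_copyToNextSkipEff numberOfCells skipmask out) := by unfold Spec_copyToNextSkipEff; infer_instance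

-- ===== CLAIM =====
def Claim_equal_copyToNextSkipEff : Prop := ∀ (numberOfCells : Int) (skipmask : List Bool), Dom_copyToNextSkipEff numberOfCells skipmask → Pre_copyToNextSkipEff numberOfCells skipmask → Spec_copyToNextSkipEff numberOfCells skipmask (copyToNextSkipEff numberOfCells skipmask)

-- ===== LEMMAS AND PROOFS =====

-- forward encoding of the mask body, on the char-list side
def encL (l : List Bool) : List Char := l.flatMap (fun s => if s then ['>'] else ['>', '+'])

-- trimmed mask: trailing Trues removed
def trim (l : List Bool) : List Bool := (l.reverse.dropWhile (· == true)).reverse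

-- index list of the False cells, starting at offset k
def falsesFrom : List Bool → Int → List Int
  | [], _ => []
  | b :: t, k => if b then falsesFrom t (k+1) else k :: falsesFrom t (k+1)

-- B's gap encoding on the char-list side
def gaps : List Int → Int → List Char
  | [], _ => []
  | i :: t, p => List.replicate (i - p).toNat '>' ++ '+' :: gaps t i

-- B's parts list
def partsOf : List Int → Int → List String
  | [], _ => []
  | i :: t, p => (String.ofList (PySem.List.pyRepeat ['>'] (i - p)) ++ "+") :: partsOf t i

lemma aTrailing_le (r : List Bool) : aTrailing r ≤ r.length := by
  induction r with
  | nil => simp [aTrailing]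
  | cons b t ih => cases b <;> simp [aTrailing] <;> omega

-- A's trimmed mask is dropWhile-true on the reverse, reversed back
lemma trim_eq (r : List Bool) :
    r.reverse.take (r.length - aTrailing r) = (r.dropWhile (· == true)).reverse := by
  induction r with
  | nil => simp
  | cons b t ih =>
    cases b with
    | false => simp [aTrailing, List.dropWhile]
    | true =>
      have h := aTrailing_le t
      have h1 : aTrailing (true :: t) = aTrailing t + 1 := by simp [aTrailing]
      have h2 : (true :: t).dropWhile (· == true) = t.dropWhile (· == true) := by
        simp [List.dropWhile]
      rw [h1, h2, List.reverse_cons, List.length_cons,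
        show t.length + 1 - (aTrailing t + 1) = t.length - aTrailing t by omega,
        List.take_append_of_le_length (by simp)]
      exact ih

-- A's foldl of string appends, moved to the list side
lemma foldA (l : List Bool) (r : String) :
    (l.foldl (fun r skip => r ++ (if skip then ">" else ">+")) r).toList
      = r.toList ++ encL l := by
  induction l generalizing r with
  | nil => simp [encL]
  | cons b t ih =>
    cases b <;> simp [encL, List.flatMap_cons, ih, String.toList_append]

-- "".join with empty separator is concatenation of the pieces
lemma join_nil_flatten (ps : List (List Char)) : PySem.Chars.join [] ps = ps.flatten := by
  induction ps with
  | nil => simp [PySem.Chars.join_nil]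
  | cons p rest ih =>
    cases rest with
    | nil => simp [PySem.Chars.join_singleton]
    | cons q u => simp [PySem.Chars.join_cons_cons, ih]

-- the comprehension over enumerate is falsesFrom
lemma filterMap_enumerate (l : List Bool) (k : Int) :
    (PySem.List.enumerate l k).filterMap (fun p => if p.2 then none else some p.1)
      = falsesFrom l k := by
  induction l generalizing k with
  | nil => simp [falsesFrom, PySem.List.enumerate_nil]
  | cons b t ih =>
    cases b <;> simp [falsesFrom, PySem.List.enumerate_cons, List.filterMap_cons, ih]

-- B's loop collects partsOf
lemma foldB (fs : List Int) (parts : List String) (p : Int) :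
    (fs.foldl (fun (acc : List String × Int) i =>
        (acc.1 ++ [String.ofList (PySem.List.pyRepeat ['>'] (i - acc.2)) ++ "+"], i))
        (parts, p)).1 = parts ++ partsOf fs p := by
  induction fs generalizing parts p with
  | nil => simp [partsOf]
  | cons i t ih =>
    simp only [List.foldl_cons, partsOf]
    rw [ih, List.append_assoc]
    rfl

-- flattening the parts gives the gap encoding
lemma flatten_partsOf (fs : List Int) (p : Int) :
    ((partsOf fs p).map String.toList).flatten = gaps fs p := by
  induction fs generalizing p with
  | nil => rfl
  | cons i t ih =>
    simp [partsOf, gaps, ih, String.toList_append, PySem.List.pyRepeat_singleton]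

lemma falsesFrom_ge (l : List Bool) (k : Int) : ∀ i ∈ falsesFrom l k, k ≤ i := by
  induction l generalizing k with
  | nil => simp [falsesFrom]
  | cons b t ih =>
    intro i hi
    cases b with
    | true =>
      rw [show falsesFrom (true :: t) k = falsesFrom t (k+1) from rfl] at hi
      have := ih (k+1) i hi; omega
    | false =>
      rw [show falsesFrom (false :: t) k = k :: falsesFrom t (k+1) from rfl] at hi
      rcases List.mem_cons.mp hi with h | h
      · omega
      · have := ih (k+1) i h; omega

-- decrementing the previous index prepends one '>' (when nonempty)
lemma gaps_shift (fs : List Int) (p : Int) (h : ∀ i ∈ fs, p ≤ i) :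
    gaps fs (p-1) = if fs = [] then [] else '>' :: gaps fs p := by
  cases fs with
  | nil => rfl
  | cons i t =>
    have hip : p ≤ i := h i (by simp)
    rw [if_neg (List.cons_ne_nil i t)]
    simp only [gaps]
    rw [show i - (p-1) = i - p + 1 by omega,
      show (i - p + 1).toNat = (i - p).toNat + 1 by omega, List.replicate_succ]
    rfl

lemma falsesFrom_nil_iff (l : List Bool) (k : Int) :
    falsesFrom l k = [] ↔ ∀ b ∈ l, b = true := by
  induction l generalizing k with
  | nil => simp [falsesFrom]
  | cons b t ih =>
    cases b with
    | true =>
      rw [show falsesFrom (true :: t) k = falsesFrom t (k+1) from rfl]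
      simp [ih]
    | false =>
      rw [show falsesFrom (false :: t) k = k :: falsesFrom t (k+1) from rfl]
      constructor
      · intro hc; cases hc
      · intro hall; exact absurd (hall false (by simp)) (by simp)

lemma trim_nil_iff (l : List Bool) : trim l = [] ↔ ∀ b ∈ l, b = true := by
  unfold trim
  rw [List.reverse_eq_nil_iff, List.dropWhile_eq_nil_iff]
  simp

lemma trim_cons_false (t : List Bool) : trim (false :: t) = false :: trim t := by
  unfold trim
  rw [List.reverse_cons, List.dropWhile_append]
  by_cases h : (t.reverse.dropWhile (· == true)) = []
  · rw [h]
    simp [List.dropWhile]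
  · rw [if_neg (by simpa [List.isEmpty_iff] using h)]
    simp

lemma trim_cons_true (t : List Bool) (h : ¬ ∀ b ∈ t, b = true) :
    trim (true :: t) = true :: trim t := by
  unfold trim
  rw [List.reverse_cons, List.dropWhile_append]
  have h' : (t.reverse.dropWhile (· == true)) ≠ [] := by
    intro hc
    exact h ((trim_nil_iff t).mp (by unfold trim; rw [hc]; rfl))
  rw [if_neg (by simpa [List.isEmpty_iff] using h')]
  simp

-- core: B's gap encoding of the False positions equals the encoding of A's trimmed mask
lemma gaps_falsesFrom (l : List Bool) (k : Int) :
    gaps (falsesFrom l k) (k-1) = encL (trim l) := by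
  induction l generalizing k with
  | nil => rfl
  | cons b t ih =>
    cases b with
    | false =>
      rw [show falsesFrom (false :: t) k = k :: falsesFrom t (k+1) from rfl]
      simp only [gaps]
      rw [show (k - (k-1)).toNat = 1 by omega, trim_cons_false]
      have := ih (k+1)
      rw [show k + 1 - 1 = k by ring] at this
      simp [encL, List.flatMap_cons, this]
    | true =>
      rw [show falsesFrom (true :: t) k = falsesFrom t (k+1) from rfl]
      rw [gaps_shift _ k (fun i hi => by have := falsesFrom_ge t (k+1) i hi; omega)]
      by_cases hall : ∀ b ∈ t, b = true
      · rw [if_pos ((falsesFrom_nil_iff t (k+1)).mpr hall)]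
        have : trim (true :: t) = [] := (trim_nil_iff _).mpr (by
          intro b hb; rcases List.mem_cons.mp hb with h | h
          · exact h ▸ rfl
          · exact hall b h)
        rw [this]; rfl
      · rw [if_neg (by rw [falsesFrom_nil_iff]; exact hall), trim_cons_true t hall]
        have := ih (k+1)
        rw [show k + 1 - 1 = k by ring] at this
        simp [encL, List.flatMap_cons, this]

-- ===== VERDICT =====
theorem copyToNextSkipEff_spec : Claim_equal_copyToNextSkipEff := by
  intro n l _ _
  show copyToNextSkipEff n l = copyToNextSkipEff_alt n l
  apply String.toList_inj.mp
  unfold copyToNextSkipEff copyToNextSkipEff_alt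
  simp only [String.toList_append, foldA, filterMap_enumerate, foldB, List.nil_append,
    PySem.Str.toList_join]
  rw [show ("" : String).toList = ([] : List Char) from rfl, join_nil_flatten, flatten_partsOf]
  have hB : gaps (falsesFrom l 0) (-1) = encL (trim l) := by
    have := gaps_falsesFrom l 0
    rw [show (0:Int) - 1 = -1 by ring] at this
    exact this
  rw [hB]
  have htrim : (if aTrailing l.reverse ≠ 0 then
      PySem.List.slice l none (some (-(aTrailing l.reverse : Int))) else l)
      = (l.reverse.dropWhile (· == true)).reverse := by
    by_cases h : aTrailing l.reverse = 0
    · have := trim_eq l.reverse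
      simp only [h, Nat.sub_zero, List.reverse_reverse] at this
      simpa [h] using this
    · rw [if_pos h, PySem.List.slice_to_neg_natCast l (aTrailing l.reverse) (by omega)]
      have := trim_eq l.reverse
      simpa [List.length_reverse] using this
  rw [htrim, show trim l = (l.reverse.dropWhile (· == true)).reverse from rfl,
    List.append_assoc, List.append_assoc,
    show ("[<]>" : String).toList ++ ("-]" : String).toList = ("[<]>-]" : String).toList by decide]
  exact (List.append_assoc _ _ _).symm
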